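-- pv_equiv track=rewrite | github.com/ShredderL/RAPS | Contest 5/is it a heap.py | HeapType
-- ===== SOURCE A (Python) =====
-- def HeapType(arr):
--     minHeap = True
--     maxHeap = True
--     n = len(arr)
--
--     for i in range(n//2):
--         left = (2*i)+1
--         right = (2*i)+2
--
--         if left < n:
--             if arr[i] < arr[left]:
--                 maxHeap = False
--             if arr[i] > arr[left]:
--                 minHeap = False
--
--         if right < n:
--             if arr[i] < arr[right]:
--                 maxHeap = False
--             if arr[i] > arr[right]:
--                 minHeap = False
--
--     if minHeap == False and maxHeap == False:
--         result = "Neither"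
--     elif minHeap == True:
--         result = "Min"
--     else:
--         result = "Max"
--
--     return result
-- ===== SOURCE B (Python) =====
-- def HeapType(arr):
--     n = len(arr)
--
--     def classify(i):
--         # (isMinHeap, isMaxHeap) of the subtree rooted at index i
--         if i >= n:
--             return (True, True)
--         lmin, lmax = classify(2 * i + 1)
--         rmin, rmax = classify(2 * i + 2)
--         mn = lmin and rmin
--         mx = lmax and rmax
--         for c in (2 * i + 1, 2 * i + 2):
--             if c < n:
--                 if arr[i] > arr[c]:
--                     mn = False
--                 if arr[i] < arr[c]:
--                     mx = False
--         return (mn, mx)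
--
--     mn, mx = classify(0)
--     if not mn and not mx:
--         return "Neither"
--     if mn:
--         return "Min"
--     return "Max"
-- ===== Notes on version B (the rewrite author's own statement) =====
-- stated objective: alternative
-- what changed: Replaced A's flat loop over parent indices with mutable flags by a recursive divide-and-combine over the implicit binary tree: classify(i) returns the (min,max)-heap status of the subtree rooted at i by combining its children's classifications with the root comparisons.
import Mathlib
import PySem

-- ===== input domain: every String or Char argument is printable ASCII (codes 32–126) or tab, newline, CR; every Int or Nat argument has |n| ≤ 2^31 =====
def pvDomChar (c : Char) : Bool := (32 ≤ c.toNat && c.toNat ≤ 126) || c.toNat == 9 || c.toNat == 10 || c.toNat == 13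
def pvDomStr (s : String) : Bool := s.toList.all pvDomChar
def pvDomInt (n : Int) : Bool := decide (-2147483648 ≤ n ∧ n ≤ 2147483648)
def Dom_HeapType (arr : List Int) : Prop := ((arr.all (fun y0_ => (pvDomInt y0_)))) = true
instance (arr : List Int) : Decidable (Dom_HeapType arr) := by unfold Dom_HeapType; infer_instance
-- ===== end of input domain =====

-- B replaces A's flat loop over parent indices (mutable flags) by a recursive divide-and-combine
-- over the implicit binary tree (classify a subtree from its children's classifications); alternative objective, equal return value.

-- ===== PORT A =====
-- state is (minHeap, maxHeap); all list accesses are in range, so getD is exact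
def HeapTypeStep (arr : List Int) (n : Nat) (st : Bool × Bool) (i : Nat) : Bool × Bool :=
  let left := 2*i+1
  let right := 2*i+2
  let st1 : Bool × Bool :=
    if left < n then
      ((if arr.getD i 0 > arr.getD left 0 then false else st.1),
       (if arr.getD i 0 < arr.getD left 0 then false else st.2))
    else st
  if right < n then
    ((if arr.getD i 0 > arr.getD right 0 then false else st1.1),
     (if arr.getD i 0 < arr.getD right 0 then false else st1.2))
  else st1

def HeapType (arr : List Int) : String :=
  let n := arr.length
  let st := (List.range (n/2)).foldl (HeapTypeStep arr n) (true, true)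
  if st.1 == false && st.2 == false then "Neither"
  else if st.1 == true then "Min"
  else "Max"

-- ===== PORT B =====
-- classify(i) of Source B: (isMinHeap, isMaxHeap) of the subtree rooted at i; the python
-- 'for c in (2i+1, 2i+2)' loop is transcribed as the two sequential child updates
def HeapClassify (arr : List Int) (n : Nat) (i : Nat) : Bool × Bool :=
  if i ≥ n then (true, true)
  else
    let l := HeapClassify arr n (2*i+1)
    let r := HeapClassify arr n (2*i+2)
    let st0 : Bool × Bool := (l.1 && r.1, l.2 && r.2)
    let st1 : Bool × Bool :=
      if 2*i+1 < n then
        ((if arr.getD i 0 > arr.getD (2*i+1) 0 then false else st0.1),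
         (if arr.getD i 0 < arr.getD (2*i+1) 0 then false else st0.2))
      else st0
    if 2*i+2 < n then
      ((if arr.getD i 0 > arr.getD (2*i+2) 0 then false else st1.1),
       (if arr.getD i 0 < arr.getD (2*i+2) 0 then false else st1.2))
    else st1
termination_by n - i
decreasing_by all_goals omega

def HeapType_alt (arr : List Int) : String :=
  let st := HeapClassify arr arr.length 0
  if !st.1 && !st.2 then "Neither"
  else if st.1 then "Min"
  else "Max"

-- ===== PRECONDITION & SPEC =====
def Spec_HeapType (arr : List Int) (out : String) : Prop := out = HeapType_alt arr
instance (arr : List Int) (out : String) : Decidable (Spec_HeapType arr out) := by unfold Spec_HeapType; infer_instance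

-- ===== CLAIM (what is proved, stated in full; the proofs are below) =====
def Claim_equal_HeapType : Prop := ∀ (arr : List Int), Dom_HeapType arr → Spec_HeapType arr (HeapType arr)

-- ===== LEMMAS AND PROOFS =====

-- per-parent boolean conditions A's loop accumulates
def cmin (arr : List Int) (n : Nat) (i : Nat) : Bool :=
  (if 2*i+1 < n then decide (arr.getD i 0 ≤ arr.getD (2*i+1) 0) else true) &&
  (if 2*i+2 < n then decide (arr.getD i 0 ≤ arr.getD (2*i+2) 0) else true)

def cmax (arr : List Int) (n : Nat) (i : Nat) : Bool :=
  (if 2*i+1 < n then decide (arr.getD i 0 ≥ arr.getD (2*i+1) 0) else true) &&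
  (if 2*i+2 < n then decide (arr.getD i 0 ≥ arr.getD (2*i+2) 0) else true)

-- membership of j in the implicit subtree rooted at i (indices < n)
def InTreeB (n i j : Nat) : Bool :=
  if i ≥ n then false
  else j == i || InTreeB n (2*i+1) j || InTreeB n (2*i+2) j
termination_by n - i
decreasing_by all_goals omega

theorem not_decide_lt (a b : Int) : (!decide (b < a)) = decide (a ≤ b) := by
  simp [← decide_not, not_lt]

theorem step_char (arr : List Int) (n : Nat) (st : Bool × Bool) (i : Nat) :
    HeapTypeStep arr n st i = (st.1 && cmin arr n i, st.2 && cmax arr n i) := by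
  unfold HeapTypeStep cmin cmax
  by_cases h1 : 2*i+1 < n <;> by_cases h2 : 2*i+2 < n <;>
    simp [h1, h2, not_decide_lt, Bool.and_comm, Bool.and_assoc]

theorem fold_char (arr : List Int) (n : Nat) (k : Nat) (b : Bool × Bool) :
    (List.range k).foldl (HeapTypeStep arr n) b =
      (b.1 && (List.range k).all (cmin arr n), b.2 && (List.range k).all (cmax arr n)) := by
  induction k generalizing b with
  | zero => simp
  | succ k ih =>
      rw [List.range_succ, List.foldl_append, ih]
      simp [List.foldl, step_char, List.all_append, Bool.and_assoc]

theorem inTree_self (n i : Nat) (h : i < n) : InTreeB n i i = true := by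
  rw [InTreeB]; simp [Nat.not_le.mpr h]

theorem inTree_child (n : Nat) : ∀ m i p c, n - i ≤ m → InTreeB n i p = true →
    (c = 2*p+1 ∨ c = 2*p+2) → c < n → InTreeB n i c = true := by
  intro m
  induction m with
  | zero =>
      intro i p c hm hp _ _
      rw [InTreeB, if_pos (by omega : i ≥ n)] at hp
      exact absurd hp (by simp)
  | succ m ih =>
      intro i p c hm hp hc hcn
      rw [InTreeB] at hp
      by_cases hi : i ≥ n
      · simp [hi] at hp
      · rw [if_neg hi] at hp
        rw [InTreeB, if_neg hi]
        simp only [Bool.or_eq_true, beq_iff_eq] at hp ⊢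
        rcases hp with (hp | hp) | hp
        · subst hp
          rcases hc with hc | hc <;> subst hc
          · exact Or.inl (Or.inr (inTree_self n _ hcn))
          · exact Or.inr (inTree_self n _ hcn)
        · exact Or.inl (Or.inr (ih (2*i+1) p c (by omega) hp hc hcn))
        · exact Or.inr (ih (2*i+2) p c (by omega) hp hc hcn)

theorem inTree_root (n : Nat) : ∀ j, j < n → InTreeB n 0 j = true := by
  intro j
  induction j using Nat.strong_induction_on with
  | _ j ih =>
      intro hj
      rcases Nat.eq_zero_or_pos j with h0 | h0
      · subst h0; exact inTree_self n 0 hj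
      · have hp : (j-1)/2 < j := by omega
        have hpt := ih _ hp (by omega)
        have hform : j = 2*((j-1)/2)+1 ∨ j = 2*((j-1)/2)+2 := by omega
        exact inTree_child n (n) 0 ((j-1)/2) j (by omega) hpt hform hj

-- B's recursive body, after the two recursive calls, is exactly A's step function
theorem classify_step (arr : List Int) (n i : Nat) (hi : ¬ i ≥ n) :
    HeapClassify arr n i =
      ((HeapClassify arr n (2*i+1)).1 && (HeapClassify arr n (2*i+2)).1 && cmin arr n i,
       (HeapClassify arr n (2*i+1)).2 && (HeapClassify arr n (2*i+2)).2 && cmax arr n i) := by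
  rw [HeapClassify, if_neg hi]
  unfold cmin cmax
  by_cases h1 : 2*i+1 < n <;> by_cases h2 : 2*i+2 < n <;>
    simp [h1, h2, not_decide_lt, Bool.and_comm, Bool.and_assoc]

-- characterization of B's classify: conjunction of cmin/cmax over the subtree
theorem classify_char (arr : List Int) (n : Nat) : ∀ m i, n - i ≤ m →
    ((HeapClassify arr n i).1 = true ↔ ∀ j, j < n → InTreeB n i j = true → cmin arr n j = true) ∧
    ((HeapClassify arr n i).2 = true ↔ ∀ j, j < n → InTreeB n i j = true → cmax arr n j = true) := by
  intro m
  induction m with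
  | zero =>
      intro i hm
      have hi : i ≥ n := by omega
      have hvac : ∀ j, InTreeB n i j = true → False := by
        intro j hj; rw [InTreeB, if_pos hi] at hj; exact absurd hj (by simp)
      rw [HeapClassify, if_pos hi]
      exact ⟨⟨fun _ j _ hj => (hvac j hj).elim, fun _ => rfl⟩,
             ⟨fun _ j _ hj => (hvac j hj).elim, fun _ => rfl⟩⟩
  | succ m ih =>
      intro i hm
      by_cases hi : i ≥ n
      · have hvac : ∀ j, InTreeB n i j = true → False := by
          intro j hj; rw [InTreeB, if_pos hi] at hj; exact absurd hj (by simp)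
        rw [HeapClassify, if_pos hi]
        exact ⟨⟨fun _ j _ hj => (hvac j hj).elim, fun _ => rfl⟩,
               ⟨fun _ j _ hj => (hvac j hj).elim, fun _ => rfl⟩⟩
      · have ihl := ih (2*i+1) (by omega)
        have ihr := ih (2*i+2) (by omega)
        have hin : i < n := by omega
        have hmem : ∀ j, InTreeB n i j = true ↔
            (j = i ∨ InTreeB n (2*i+1) j = true ∨ InTreeB n (2*i+2) j = true) := by
          intro j; rw [InTreeB, if_neg hi]; simp [or_assoc]
        rw [classify_step arr n i hi]
        simp only [Bool.and_eq_true]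
        constructor
        · constructor
          · rintro ⟨⟨hl, hr⟩, hc⟩ j hj hjt
            rcases (hmem j).mp hjt with rfl | h | h
            · exact hc
            · exact (ihl.1.mp hl) j hj h
            · exact (ihr.1.mp hr) j hj h
          · intro h
            exact ⟨⟨ihl.1.mpr (fun j hj hjt => h j hj ((hmem j).mpr (Or.inr (Or.inl hjt)))),
                   ihr.1.mpr (fun j hj hjt => h j hj ((hmem j).mpr (Or.inr (Or.inr hjt))))⟩,
                   h i hin (inTree_self n i hin)⟩
        · constructor
          · rintro ⟨⟨hl, hr⟩, hc⟩ j hj hjt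
            rcases (hmem j).mp hjt with rfl | h | h
            · exact hc
            · exact (ihl.2.mp hl) j hj h
            · exact (ihr.2.mp hr) j hj h
          · intro h
            exact ⟨⟨ihl.2.mpr (fun j hj hjt => h j hj ((hmem j).mpr (Or.inr (Or.inl hjt)))),
                   ihr.2.mpr (fun j hj hjt => h j hj ((hmem j).mpr (Or.inr (Or.inr hjt))))⟩,
                   h i hin (inTree_self n i hin)⟩

-- cmin/cmax are vacuously true at childless indices, so only i < n/2 matter
theorem c_vacuous (arr : List Int) (n i : Nat) (h : ¬ i < n/2) :
    cmin arr n i = true ∧ cmax arr n i = true := by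
  rw [cmin, cmax]
  have h1 : ¬ 2*i+1 < n := by omega
  have h2 : ¬ 2*i+2 < n := by omega
  simp
  exact ⟨⟨Or.inl (by omega), Or.inl (by omega)⟩, Or.inl (by omega), Or.inl (by omega)⟩

theorem classify_root_min (arr : List Int) :
    (HeapClassify arr arr.length 0).1 = (List.range (arr.length/2)).all (cmin arr arr.length) := by
  rw [Bool.eq_iff_iff]
  rw [(classify_char arr arr.length arr.length 0 (by omega)).1]
  simp only [List.all_eq_true, List.mem_range]
  constructor
  · intro h j hj
    exact h j (by omega) (inTree_root _ j (by omega))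
  · intro h j hj _
    by_cases hc : j < arr.length/2
    · exact h j hc
    · exact (c_vacuous arr arr.length j hc).1

theorem classify_root_max (arr : List Int) :
    (HeapClassify arr arr.length 0).2 = (List.range (arr.length/2)).all (cmax arr arr.length) := by
  rw [Bool.eq_iff_iff]
  rw [(classify_char arr arr.length arr.length 0 (by omega)).2]
  simp only [List.all_eq_true, List.mem_range]
  constructor
  · intro h j hj
    exact h j (by omega) (inTree_root _ j (by omega))
  · intro h j hj _
    by_cases hc : j < arr.length/2
    · exact h j hc
    · exact (c_vacuous arr arr.length j hc).2

-- ===== VERDICT (by name: the statement is the Claim_ definition above) =====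
theorem HeapType_spec : Claim_equal_HeapType := by
  intro arr _
  show HeapType arr = HeapType_alt arr
  simp only [HeapType, HeapType_alt, fold_char, Bool.true_and, classify_root_min, classify_root_max]
  cases h1 : (List.range (arr.length/2)).all (cmin arr arr.length) <;>
  cases h2 : (List.range (arr.length/2)).all (cmax arr arr.length) <;>
  simp
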